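-- pv_equiv track=rewrite | github.com/MINCHAEKEEM/BaekjoonHub | 프로그래머스/1/76501. 음양 더하기/음양 더하기.py | solution
-- ===== SOURCE A (Python) =====
-- def solution(absolutes, signs):
--     answer = []
--     for i in range(len(absolutes)):
--         if signs[i]:
--             answer.append(absolutes[i])
--         else:
--             answer.append(-absolutes[i])
--
--     return sum(answer)
-- ===== SOURCE B (Python) =====
-- def solution(absolutes, signs):
--     total = sum(absolutes)
--     neg = 0
--     for a, s in zip(absolutes, signs):
--         if not s:
--             neg += a
--     return total - 2 * neg
-- ===== Notes on version B (the rewrite author's own statement) =====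
-- stated objective: alternative
-- what changed: Instead of building a signed list by indexing and summing it, B sums all absolutes once and then folds over zip(absolutes, signs) accumulating only the falsy-sign entries, returning total - 2*neg; A's intermediate list and index loop disappear.
import Mathlib
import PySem

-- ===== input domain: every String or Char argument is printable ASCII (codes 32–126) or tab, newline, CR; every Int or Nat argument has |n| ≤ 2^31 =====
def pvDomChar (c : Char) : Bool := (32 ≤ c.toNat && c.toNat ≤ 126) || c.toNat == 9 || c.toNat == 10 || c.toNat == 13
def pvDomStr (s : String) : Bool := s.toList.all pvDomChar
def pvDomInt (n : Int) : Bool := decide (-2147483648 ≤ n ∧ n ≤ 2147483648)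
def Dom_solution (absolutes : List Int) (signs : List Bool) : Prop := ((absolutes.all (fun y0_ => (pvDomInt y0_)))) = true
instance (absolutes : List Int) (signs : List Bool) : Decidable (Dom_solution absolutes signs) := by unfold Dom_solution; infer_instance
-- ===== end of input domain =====

-- B replaces A's indexed signed-list build with: one total sum plus a zip fold of the falsy-sign entries, returning total - 2*neg (alternative decomposition, same cost).

-- ===== PORT A =====
-- literal port: build `answer` by appending (±absolutes[i]) for i in range(len(absolutes)), then sum it
def solution (absolutes : List Int) (signs : List Bool) : Int :=
  let answer : List Int :=
    (PySem.List.pyRange 0 absolutes.length 1).foldl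
      (fun ans i =>
        if PySem.List.pyGetD signs i false then
          ans ++ [PySem.List.pyGetD absolutes i 0]
        else
          ans ++ [-(PySem.List.pyGetD absolutes i 0)]) []
  answer.foldl (· + ·) 0

-- ===== PORT B =====
def solution_alt (absolutes : List Int) (signs : List Bool) : Int :=
  let total := absolutes.foldl (· + ·) 0
  let neg := (absolutes.zip signs).foldl (fun acc p => if !p.2 then acc + p.1 else acc) 0
  total - 2 * neg

-- ===== PRECONDITION & SPEC =====
-- A indexes signs[i] for every i < len(absolutes); it raises IndexError when signs is shorter.
def Pre_solution (absolutes : List Int) (signs : List Bool) : Prop :=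
  absolutes.length ≤ signs.length
instance (absolutes : List Int) (signs : List Bool) : Decidable (Pre_solution absolutes signs) := by
  unfold Pre_solution; infer_instance

def pvWitness_solution : List Int × List Bool := ([4, 7, 12], [true, false, true])

def Spec_solution (absolutes : List Int) (signs : List Bool) (out : Int) : Prop :=
  out = solution_alt absolutes signs
instance (absolutes : List Int) (signs : List Bool) (out : Int) : Decidable (Spec_solution absolutes signs out) := by
  unfold Spec_solution; infer_instance

-- ===== CLAIM (what is proved, stated in full; the proofs are below) =====
def Claim_equal_solution : Prop := ∀ (absolutes : List Int) (signs : List Bool), Dom_solution absolutes signs → Pre_solution absolutes signs → Spec_solution absolutes signs (solution absolutes signs)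

-- ===== LEMMAS AND PROOFS =====

-- the branching append-accumulating fold is init ++ map of the branched value
theorem foldl_if_append {α β : Type} (c : β → Bool) (f g : β → α) (l : List β) (init : List α) :
    l.foldl (fun ans i => if c i then ans ++ [f i] else ans ++ [g i]) init
      = init ++ l.map (fun i => if c i then f i else g i) := by
  induction l generalizing init with
  | nil => simp
  | cons x xs ih =>
    simp only [List.foldl, List.map]
    by_cases h : c x = true <;> simp [h, ih]

theorem foldl_add_int (l : List Int) (init : Int) :
    l.foldl (· + ·) init = init + l.sum := by
  induction l generalizing init with
  | nil => simp
  | cons x xs ih => simp [List.foldl, ih]; ring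

theorem neg_foldl_eq (l : List (Int × Bool)) (init : Int) :
    l.foldl (fun acc p => if !p.2 then acc + p.1 else acc) init
      = init + (l.foldl (fun acc p => if !p.2 then acc + p.1 else acc) 0) := by
  induction l generalizing init with
  | nil => simp
  | cons x xs ih =>
    simp only [List.foldl]
    rw [ih, ih (if !x.2 then 0 + x.1 else 0)]
    split <;> ring

-- core identity, by simultaneous structural induction
theorem core (absolutes : List Int) (signs : List Bool)
    (h : absolutes.length ≤ signs.length) :
    ((absolutes.zip signs).map (fun p => if p.2 then p.1 else -p.1)).sum
      = absolutes.sum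
        - 2 * (absolutes.zip signs).foldl (fun acc p => if !p.2 then acc + p.1 else acc) 0 := by
  induction absolutes generalizing signs with
  | nil => simp
  | cons a abs' ih =>
    cases signs with
    | nil => simp at h
    | cons s signs' =>
      simp only [List.zip_cons_cons, List.map, List.sum_cons, List.foldl]
      rw [neg_foldl_eq]
      have := ih signs' (by simpa using h)
      rw [this]
      cases s <;> simp <;> ring

-- the zip view of A's answer list
theorem answer_eq_zip (absolutes : List Int) (signs : List Bool)
    (h : absolutes.length ≤ signs.length) :
    (PySem.List.pyRange 0 absolutes.length 1).map
        (fun i => if PySem.List.pyGetD signs i false then PySem.List.pyGetD absolutes i 0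
                  else -(PySem.List.pyGetD absolutes i 0))
      = (absolutes.zip signs).map (fun p => if p.2 then p.1 else -p.1) := by
  rw [PySem.List.pyRange_one]
  simp only [Int.sub_zero, Int.toNat_natCast, List.map_map]
  apply List.ext_getElem
  · simp [List.length_zip]; omega
  · intro k hk1 hk2
    simp only [List.length_map, List.length_range] at hk1
    have hks : k < signs.length := lt_of_lt_of_le hk1 h
    simp only [List.getElem_map, List.getElem_range, List.getElem_zip, Function.comp]
    rw [show ((0 : Int) + (k : Int)) = ((k : Nat) : Int) by simp]
    rw [PySem.List.pyGetD_natCast, PySem.List.pyGetD_natCast]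
    simp [List.getD_eq_getElem?_getD, hk1, hks]

-- ===== VERDICT (by name: the statement is the Claim_ definition above) =====
theorem solution_spec : Claim_equal_solution := by
  intro absolutes signs _ hpre
  unfold Spec_solution solution solution_alt
  simp only []
  rw [foldl_if_append (fun i => PySem.List.pyGetD signs i false)
        (fun i => PySem.List.pyGetD absolutes i 0)
        (fun i => -(PySem.List.pyGetD absolutes i 0)),
      List.nil_append, answer_eq_zip absolutes signs hpre, foldl_add_int,
      core absolutes signs hpre, foldl_add_int]
  ring
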